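-- pv_equiv track=rewrite | github.com/Shrilboss/learning | lab05.py | solve06
-- ===== SOURCE A (Python) =====
-- def solve06(S, Q, engines, queries):
--     #Write your solution here.
--     #Remember to replace "pass" with your own return statement!
--     l=[]
--     cnt=0
--
--     for i in range(len(queries)):
--         if(queries[i] in engines):
--             cnt+=1
--             engines.remove(queries[i])
--
--             l.append(queries[i])
--             if(cnt==(S-1)):
--                 break
--     ans=0
--     for i in range(len(queries)):
--         if(engines[0]==queries[i]):
--             ans+=1
--     return(ans)
-- ===== SOURCE B (Python) =====
-- def solve06(S, Q, engines, queries):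
--     # Counter-based simulation: O(len(queries)+len(engines)) instead of A's
--     # repeated O(S) membership tests and removals. (A mutates `engines` in
--     # place; B does not — the equivalence is about the return value.)
--     from collections import Counter
--     avail = Counter(engines)
--     removed = Counter()
--     cnt = 0
--     for q in queries:
--         if removed[q] < avail[q]:
--             removed[q] += 1
--             cnt += 1
--             if cnt == S - 1:
--                 break
--     survivor = None
--     seen = Counter()
--     for e in engines:
--         if seen[e] >= removed[e]:
--             survivor = e
--             break
--         seen[e] += 1
--     return queries.count(survivor)
-- ===== Notes on version B (the rewrite author's own statement) =====
-- stated objective: faster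
-- what changed: B replaces A's repeated O(S) list membership tests and list.remove calls by Counter bookkeeping (one dict of available counts, one of removal counts), finds the surviving head in one pass over engines instead of materially shrinking the list, and counts matching queries with one list.count; also B does not mutate the engines argument, where A empties it in place.
import Mathlib
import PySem

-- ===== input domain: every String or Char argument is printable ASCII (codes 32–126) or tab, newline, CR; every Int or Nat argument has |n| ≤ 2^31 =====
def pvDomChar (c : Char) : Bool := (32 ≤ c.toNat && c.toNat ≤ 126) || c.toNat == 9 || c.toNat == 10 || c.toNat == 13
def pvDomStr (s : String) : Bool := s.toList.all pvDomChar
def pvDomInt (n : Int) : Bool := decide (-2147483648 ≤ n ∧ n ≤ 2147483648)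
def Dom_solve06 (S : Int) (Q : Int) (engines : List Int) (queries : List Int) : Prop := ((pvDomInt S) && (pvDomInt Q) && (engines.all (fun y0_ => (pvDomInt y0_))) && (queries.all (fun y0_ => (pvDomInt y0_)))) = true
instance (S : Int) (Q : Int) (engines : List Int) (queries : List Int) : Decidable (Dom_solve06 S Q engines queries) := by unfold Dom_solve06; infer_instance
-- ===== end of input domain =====

-- B replaces A's repeated list membership tests and list.remove calls by Counter
-- bookkeeping plus a single survivor scan (A also empties `engines` in place; B does
-- not mutate it — the equivalence proved here is about the return value).

-- ===== PORT A =====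
-- A's first loop: walks the queries, removes the first occurrence of a hit from the
-- engines list, breaks when cnt reaches S-1; returns the final engines list.
def solve06Loop (S : Int) : List Int → List Int → Int → List Int
  | [], es, _ => es
  | q :: rest, es, cnt =>
    if es.contains q then
      -- `q ∈ es` holds here, so Python's engines.remove(q) succeeds: remove? = some
      if cnt + 1 == S - 1 then (PySem.List.remove? es q).getD es
      else solve06Loop S rest ((PySem.List.remove? es q).getD es) (cnt + 1)
    else solve06Loop S rest es cnt

def solve06 (S : Int) (Q : Int) (engines : List Int) (queries : List Int) : Int :=
  let es := solve06Loop S queries engines 0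
  -- second loop: ans += 1 whenever engines[0] == queries[i]
  -- (engines[0] raises IndexError when es = [] and queries ≠ []: excluded by Pre_)
  queries.foldl (fun ans q => if PySem.List.pyGetD es 0 0 == q then ans + 1 else ans) 0

-- ===== PORT B =====
-- B's first loop: same walk over queries, but the state is the Counter `removed`.
def solve06AltLoop (S : Int) (avail : PySem.Dict Int Int) : List Int → PySem.Dict Int Int → Int → PySem.Dict Int Int
  | [], removed, _ => removed
  | q :: rest, removed, cnt =>
    if removed.getD q 0 < avail.getD q 0 then
      if cnt + 1 == S - 1 then removed.modify q 0 (· + 1)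
      else solve06AltLoop S avail rest (removed.modify q 0 (· + 1)) (cnt + 1)
    else solve06AltLoop S avail rest removed cnt

-- B's survivor scan: first engine whose occurrence rank reaches its removal count.
def solve06Scan (removed : PySem.Dict Int Int) : List Int → PySem.Dict Int Int → Option Int
  | [], _ => none
  | e :: rest, seen =>
    if removed.getD e 0 ≤ seen.getD e 0 then some e
    else solve06Scan removed rest (seen.modify e 0 (· + 1))

def solve06_alt (S : Int) (Q : Int) (engines : List Int) (queries : List Int) : Int :=
  let removed := solve06AltLoop S (PySem.Dict.counter engines) queries PySem.Dict.empty 0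
  let survivor := solve06Scan removed engines PySem.Dict.empty
  -- queries.count(survivor); survivor = None matches no int
  (queries.countP (fun q => some q == survivor) : Int)

-- ===== PRECONDITION & SPEC =====
-- Pre_ excludes exactly the inputs on which A raises IndexError (engines[0] after
-- every engine has been removed): queries nonempty, queries cover engines as a
-- multiset, and the break threshold never stops the removals (S ≤ 1 or len ≤ S-1).
def Pre_solve06 (S : Int) (Q : Int) (engines : List Int) (queries : List Int) : Prop :=
  queries = [] ∨
    ¬((∀ v ∈ engines, engines.count v ≤ queries.count v) ∧
      (S ≤ 1 ∨ (engines.length : Int) ≤ S - 1))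
instance (S : Int) (Q : Int) (engines : List Int) (queries : List Int) : Decidable (Pre_solve06 S Q engines queries) := by unfold Pre_solve06; infer_instance

def pvWitness_solve06 : Int × Int × List Int × List Int := (2, 1, [1, 2], [1])

def Spec_solve06 (S : Int) (Q : Int) (engines : List Int) (queries : List Int) (out : Int) : Prop := out = solve06_alt S Q engines queries
instance (S : Int) (Q : Int) (engines : List Int) (queries : List Int) (out : Int) : Decidable (Spec_solve06 S Q engines queries out) := by unfold Spec_solve06; infer_instance

-- ===== CLAIM (what is proved, stated in full; the proofs are below) =====
def Claim_equal_solve06 : Prop := ∀ (S : Int) (Q : Int) (engines : List Int) (queries : List Int), Dom_solve06 S Q engines queries → Pre_solve06 S Q engines queries → Spec_solve06 S Q engines queries (solve06 S Q engines queries)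

-- ===== LEMMAS AND PROOFS =====

-- `eraseF es f` removes, for each value v, the first (f v) occurrences of v from es.
-- It mediates between A's shrinking list and B's `removed` counter.
def eraseF : List Int → (Int → Int) → List Int
  | [], _ => []
  | e :: rest, f =>
    if 0 < f e then eraseF rest (fun v => if v = e then f v - 1 else f v)
    else e :: eraseF rest f

theorem count_cons_int (q e : Int) (rest : List Int) :
    (((e :: rest).count q : Nat) : Int) = ((rest.count q : Nat) : Int) + (if e = q then 1 else 0) := by
  rw [List.count_cons]
  by_cases h : e = q
  · simp [h]
  · simp [h, Ne.symm h]

theorem eraseF_nonpos (es : List Int) (f : Int → Int) (h : ∀ v, f v ≤ 0) :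
    eraseF es f = es := by
  induction es with
  | nil => rfl
  | cons e rest ih => simp [eraseF, not_lt.mpr (h e), ih]

theorem mem_eraseF (es : List Int) (f : Int → Int) (q : Int) (h0 : 0 ≤ f q) :
    q ∈ eraseF es f ↔ f q < (es.count q : Int) := by
  induction es generalizing f with
  | nil => simp [eraseF]; omega
  | cons e rest ih =>
    have hc := count_cons_int q e rest
    by_cases he : 0 < f e
    · rw [eraseF, if_pos he]
      by_cases heq : e = q
      · subst heq
        rw [ih _ (by simp; omega)]
        rw [hc]
        simp
        try omega
      · rw [ih _ (by simp [Ne.symm heq]; omega)]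
        rw [hc, if_neg heq]
        simp [Ne.symm heq]
        try omega
    · rw [eraseF, if_neg he]
      by_cases heq : e = q
      · subst heq
        rw [hc]
        have : (0 : Int) ≤ rest.count e := by positivity
        simp
        omega
      · rw [hc, if_neg heq, List.mem_cons]
        have hne : ¬ q = e := Ne.symm heq
        simp only [hne, false_or]
        rw [ih f h0]
        omega

theorem remove_eraseF (es : List Int) (f : Int → Int) (q : Int)
    (h0 : 0 ≤ f q) (h1 : f q < (es.count q : Int)) :
    PySem.List.remove? (eraseF es f) q
      = some (eraseF es (fun v => if v = q then f v + 1 else f v)) := by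
  induction es generalizing f with
  | nil => simp at h1; omega
  | cons e rest ih =>
    have hc := count_cons_int q e rest
    rw [hc] at h1
    by_cases he : 0 < f e
    · rw [eraseF, if_pos he]
      have he' : 0 < (if e = q then f e + 1 else f e) := by split <;> omega
      rw [eraseF, if_pos he']
      by_cases heq : e = q
      · subst heq
        rw [if_pos rfl] at h1
        rw [ih (fun v => if v = e then f v - 1 else f v) (by simp; omega) (by simp; omega)]
        congr 1
        apply congrArg
        funext v
        by_cases hv : v = e <;> simp [hv]
      · rw [if_neg heq] at h1
        rw [ih (fun v => if v = e then f v - 1 else f v)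
            (by simp [Ne.symm heq]; omega) (by simp [Ne.symm heq]; omega)]
        congr 1
        apply congrArg
        funext v
        by_cases hv : v = e <;> by_cases hv' : v = q <;> simp [hv, hv'] <;> omega
    · rw [eraseF, if_neg he]
      by_cases heq : e = q
      · subst heq
        rw [PySem.List.remove?_cons_self]
        have he' : 0 < (if e = e then f e + 1 else f e) := by simp; omega
        rw [eraseF, if_pos he']
        have hf : (fun v => if v = e then (if v = e then f v + 1 else f v) - 1 else (if v = e then f v + 1 else f v)) = f := by
          funext v; by_cases hv : v = e <;> simp [hv]
        rw [hf]
      · rw [if_neg heq] at h1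
        rw [PySem.List.remove?_cons_of_ne (eraseF rest f) heq]
        rw [ih f h0 (by omega)]
        have he' : ¬ 0 < (if e = q then f e + 1 else f e) := by rw [if_neg heq]; omega
        rw [eraseF, if_neg he']
        rfl

theorem scan_eraseF (removed : PySem.Dict Int Int) (es : List Int) (seen : PySem.Dict Int Int) :
    solve06Scan removed es seen
      = (eraseF es (fun v => removed.getD v 0 - seen.getD v 0)).head? := by
  induction es generalizing seen with
  | nil => rfl
  | cons e rest ih =>
    by_cases h : removed.getD e 0 ≤ seen.getD e 0
    · rw [solve06Scan, if_pos h, eraseF, if_neg (by omega)]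
      rfl
    · rw [solve06Scan, if_neg h, eraseF, if_pos (by omega), ih]
      congr 1
      apply congrArg
      funext v
      by_cases hv : v = e <;> simp [hv, PySem.Dict.getD_modify] <;> try omega

theorem altLoop_getD_nonneg (S : Int) (avail : PySem.Dict Int Int) (qs : List Int)
    (removed : PySem.Dict Int Int) (cnt : Int)
    (h : ∀ v, 0 ≤ removed.getD v 0) (v : Int) :
    0 ≤ (solve06AltLoop S avail qs removed cnt).getD v 0 := by
  induction qs generalizing removed cnt with
  | nil => exact h v
  | cons q rest ih =>
    rw [solve06AltLoop]
    have hmod : ∀ v, 0 ≤ (removed.modify q 0 (· + 1)).getD v 0 := by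
      intro w
      rw [PySem.Dict.getD_modify]
      split <;> [skip; exact h w] <;> have := h q <;> omega
    split
    · split
      · exact hmod v
      · exact ih _ _ hmod
    · exact ih _ _ h

theorem altLoop_getD_le (S : Int) (avail : PySem.Dict Int Int) (qs : List Int)
    (removed : PySem.Dict Int Int) (cnt : Int) (v : Int) :
    (solve06AltLoop S avail qs removed cnt).getD v 0 ≤ removed.getD v 0 + qs.count v := by
  induction qs generalizing removed cnt with
  | nil => simp [solve06AltLoop]
  | cons q rest ih =>
    rw [solve06AltLoop]
    have hmod : (removed.modify q 0 (· + 1)).getD v 0 ≤ removed.getD v 0 + if q = v then 1 else 0 := by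
      rw [PySem.Dict.getD_modify]
      by_cases hv : v = q <;> simp [hv] <;> omega
    have hcount : (((q :: rest).count v : Nat) : Int) = ((rest.count v : Nat) : Int) + if q = v then 1 else 0 :=
      count_cons_int v q rest
    split
    · split
      · rw [hcount]
        have : (0 : Int) ≤ rest.count v := by positivity
        omega
      · have := ih (removed.modify q 0 (· + 1)) (cnt + 1)
        rw [hcount]; omega
    · have := ih removed cnt
      rw [hcount]
      have : (0 : Int) ≤ if q = v then 1 else 0 := by positivity
      omega

-- A's loop removes at most S-1-cnt further engines when cnt < S-1.
theorem loopA_length (S : Int) (qs : List Int) (es : List Int) (cnt : Int)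
    (h : cnt < S - 1) :
    (es.length : Int) - (S - 1 - cnt) ≤ ((solve06Loop S qs es cnt).length : Int) := by
  induction qs generalizing es cnt with
  | nil => simp [solve06Loop]; omega
  | cons q rest ih =>
    rw [solve06Loop]
    by_cases hq : es.contains q
    · rw [if_pos hq]
      have hmem : q ∈ es := by simpa using hq
      have hrem : PySem.List.remove? es q = some (es.erase q) :=
        PySem.List.remove?_eq_some_erase es q hmem
      have hlen : ((es.erase q).length : Int) = (es.length : Int) - 1 := by
        have := List.length_erase_of_mem hmem
        have hpos : 0 < es.length := List.length_pos_of_mem hmem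
        omega
      by_cases hb : cnt + 1 == S - 1
      · rw [if_pos hb, hrem]
        have : cnt + 1 = S - 1 := by exact_mod_cast eq_of_beq hb
        simp only [Option.getD_some]
        omega
      · rw [if_neg hb, hrem]
        have hne : cnt + 1 ≠ S - 1 := by intro h'; exact absurd (beq_iff_eq.mpr h') (by simpa using hb)
        have := ih (es.erase q) (cnt + 1) (by omega)
        simp only [Option.getD_some] at *
        omega
    · rw [if_neg hq]
      have := ih es cnt h
      omega

-- The central synchronisation: A's list state is eraseF of the original engines
-- under B's removal counter, throughout the loop.
theorem loop_sync (S : Int) (engines : List Int) (qs : List Int)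
    (removed : PySem.Dict Int Int) (cnt : Int)
    (h : ∀ v, 0 ≤ removed.getD v 0) :
    solve06Loop S qs (eraseF engines (fun v => removed.getD v 0)) cnt
      = eraseF engines (fun v => (solve06AltLoop S (PySem.Dict.counter engines) qs removed cnt).getD v 0) := by
  induction qs generalizing removed cnt with
  | nil => rfl
  | cons q rest ih =>
    rw [solve06Loop, solve06AltLoop, PySem.Dict.getD_counter]
    have hmemiff := mem_eraseF engines (fun v => removed.getD v 0) q (h q)
    by_cases hcond : removed.getD q 0 < (engines.count q : Int)
    · have hmem : q ∈ eraseF engines (fun v => removed.getD v 0) := hmemiff.mpr hcond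
      rw [if_pos (by simpa using hmem), if_pos hcond]
      have hrem := remove_eraseF engines (fun v => removed.getD v 0) q (h q) hcond
      have hfun : (fun v => if v = q then removed.getD v 0 + 1 else removed.getD v 0)
          = (fun v => (removed.modify q 0 (· + 1)).getD v 0) := by
        funext v
        rw [PySem.Dict.getD_modify]
        by_cases hv : v = q <;> simp [hv]
      have hmod : ∀ v, 0 ≤ (removed.modify q 0 (· + 1)).getD v 0 := by
        intro w
        rw [PySem.Dict.getD_modify]
        split <;> [skip; exact h w] <;> have := h q <;> omega
      by_cases hb : cnt + 1 == S - 1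
      · rw [if_pos hb, if_pos hb, hrem, Option.getD_some, hfun]
      · rw [if_neg hb, if_neg hb, hrem, Option.getD_some, hfun]
        exact ih _ _ hmod
    · have hmem : q ∉ eraseF engines (fun v => removed.getD v 0) := fun hm => hcond (hmemiff.mp hm)
      rw [if_neg (by simpa using hmem), if_neg hcond]
      exact ih _ _ h

theorem empty_getD_zero (v : Int) : (PySem.Dict.empty : PySem.Dict Int Int).getD v 0 = 0 := rfl

theorem solve06_spec' (S : Int) (Q : Int) (engines : List Int) (queries : List Int)
    (hpre : Pre_solve06 S Q engines queries) :
    solve06 S Q engines queries = solve06_alt S Q engines queries := by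
  rcases hpre with hq | hnot
  · subst hq; rfl
  · simp only [solve06, solve06_alt]
    set removedF := solve06AltLoop S (PySem.Dict.counter engines) queries PySem.Dict.empty 0 with hremF
    have h0 : ∀ v, 0 ≤ (PySem.Dict.empty : PySem.Dict Int Int).getD v 0 := by
      intro v; rw [empty_getD_zero]
    have hsync := loop_sync S engines queries PySem.Dict.empty 0 h0
    have hinit : eraseF engines (fun v => (PySem.Dict.empty : PySem.Dict Int Int).getD v 0) = engines := by
      apply eraseF_nonpos; intro v; rw [empty_getD_zero]
    rw [hinit] at hsync
    have hFnonneg : ∀ v, 0 ≤ removedF.getD v 0 := fun v =>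
      altLoop_getD_nonneg S _ queries PySem.Dict.empty 0 h0 v
    have hscan := scan_eraseF removedF engines PySem.Dict.empty
    have hscanF : (fun v => removedF.getD v 0 - (PySem.Dict.empty : PySem.Dict Int Int).getD v 0)
        = (fun v => removedF.getD v 0) := by
      funext v; rw [empty_getD_zero]; ring
    rw [hscanF] at hscan
    -- the final engines list (A's state) is nonempty
    have hne : eraseF engines (fun v => removedF.getD v 0) ≠ [] := by
      by_cases hcov : ∀ v ∈ engines, engines.count v ≤ queries.count v
      · -- then the break threshold fired: 1 < S and S - 1 < engines.length
        have hS : ¬(S ≤ 1 ∨ (engines.length : Int) ≤ S - 1) := fun h' => hnot ⟨hcov, h'⟩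
        rw [← hsync]
        have := loopA_length S queries engines 0 (by omega)
        intro hnil
        rw [hnil] at this
        simp at this
        omega
      · simp only [not_forall, Classical.not_imp, not_le] at hcov
        obtain ⟨v, hvmem, hvlt⟩ := hcov
        have hvle := altLoop_getD_le S (PySem.Dict.counter engines) queries PySem.Dict.empty 0 v
        rw [empty_getD_zero, ← hremF] at hvle
        have hvmem' : v ∈ eraseF engines (fun v => removedF.getD v 0) := by
          rw [mem_eraseF engines (fun w => removedF.getD w 0) v (hFnonneg v)]
          omega
        exact fun hnil => by simp [hnil] at hvmem'
    rw [hsync, hscan]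
    obtain ⟨e, t, het⟩ : ∃ e t, eraseF engines (fun v => removedF.getD v 0) = e :: t := by
      cases hF : eraseF engines (fun v => removedF.getD v 0) with
      | nil => exact absurd hF hne
      | cons e t => exact ⟨e, t, rfl⟩
    rw [het]
    simp only [List.head?_cons]
    rw [PySem.List.pyGetD_zero_cons]
    have hfold : queries.foldl (fun ans q => if e == q then ans + 1 else ans) 0
        = (queries.count e : Int) := by
      have : (fun (ans : Int) (q : Int) => if e == q then ans + 1 else ans)
          = (fun (ans : Int) (q : Int) => if q == e then ans + 1 else ans) := by
        funext ans q
        by_cases h : e = q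
        · simp [h]
        · simp [beq_iff_eq, h, Ne.symm h]
      rw [this, PySem.List.foldl_beq_add_one]
      ring
    rw [hfold]
    have hcount : queries.countP (fun q => some q == some e) = queries.count e := by
      simp [List.count_eq_countP]
    rw [hcount]

-- ===== VERDICT (by name: the statement is the Claim_ definition above) =====
theorem solve06_spec : Claim_equal_solve06 := by
  intro S Q engines queries _ hpre
  exact solve06_spec' S Q engines queries hpre
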